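-- pv_equiv track=rewrite | github.com/DWShuo/posTagger | parse.py | simpleStemming
-- ===== SOURCE A (Python) =====
-- def simpleStemming(word):
--     ''' Very naive stemming technique, remove 1 char at a time from back ,do samething from front
--         return a list of each char removed and brute force to see if variation exits.
--         sort list so that longest words appear in the front, so we dont automaticlly assume the word is
--         a DET like A.
--     '''
--     morphList = []
--     for i in range(len(word)):
--         morphList.append(word[:i*-1])
--         morphList.append(word[i:])
--     morphList = list(dict.fromkeys(morphList)) #removes duplicates from list
--     morphList.sort(key=len, reverse=True) #sort by word length
--     morphList = morphList[1:-1] #remove front and back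
--     morphList = [i for i in morphList if len(i) >= 2]
--     return morphList
-- ===== SOURCE B (Python) =====
-- def simpleStemming(word):
--     res = []
--     n = len(word)
--     for i in range(1, n - 1):
--         p = word[:-i]
--         s = word[i:]
--         res.append(p)
--         if s != p:
--             res.append(s)
--     return res
-- ===== Notes on version B (the rewrite author's own statement) =====
-- stated objective: simpler
-- what changed: B emits each surviving pair word[:-i], word[i:] directly for i = 1..len(word)-2 with an in-pair duplicate check, replacing A's build-all-then-dict.fromkeys-dedup, stable sort by length and [1:-1] trim plus length filter.
import Mathlib
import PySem

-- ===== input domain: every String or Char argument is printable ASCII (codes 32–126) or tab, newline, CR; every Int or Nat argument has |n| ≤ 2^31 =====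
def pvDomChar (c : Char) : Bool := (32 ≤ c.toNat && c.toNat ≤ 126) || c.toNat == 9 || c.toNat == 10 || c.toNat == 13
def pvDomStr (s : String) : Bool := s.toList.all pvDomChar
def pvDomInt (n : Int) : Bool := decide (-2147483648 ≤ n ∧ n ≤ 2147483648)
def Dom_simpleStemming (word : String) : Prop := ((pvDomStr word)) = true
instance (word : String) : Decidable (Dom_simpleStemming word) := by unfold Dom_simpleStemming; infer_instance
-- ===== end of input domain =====

-- B builds the surviving prefix/suffix pairs directly in one pass (prefix before suffix, i ascending),
-- with no dedup dictionary, no sort and no end-trimming — a simpler direct construction of the same list.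

-- ===== PORT A =====
def simpleStemming (word : String) : List String :=
  let morphList : List String :=
    (PySem.List.pyRange 0 (PySem.Str.len word) 1).foldl
      (fun acc i =>
        (acc ++ [PySem.Str.slice word none (some (i * (-1)))]) ++
          [PySem.Str.slice word (some i) none]) []
  let morphList2 := PySem.List.dedup morphList
  let morphList3 := PySem.List.sorted morphList2 (fun s => PySem.Str.len s) true
  let morphList4 := PySem.List.slice morphList3 (some 1) (some (-1))
  morphList4.filter (fun i => decide (2 ≤ PySem.Str.len i))

-- ===== PORT B =====
def simpleStemming_alt (word : String) : List String :=
  (PySem.List.pyRange 1 (PySem.Str.len word - 1) 1).foldl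
    (fun res i =>
      let p := PySem.Str.slice word none (some (-i))
      let s := PySem.Str.slice word (some i) none
      let res2 := res ++ [p]
      if s ≠ p then res2 ++ [s] else res2) []

-- ===== PRECONDITION & SPEC =====
def Spec_simpleStemming (word : String) (out : List String) : Prop := out = simpleStemming_alt word
instance (word : String) (out : List String) : Decidable (Spec_simpleStemming word out) := by unfold Spec_simpleStemming; infer_instance

-- ===== CLAIM (what is proved, stated in full; the proofs are below) =====
def Claim_equal_simpleStemming : Prop := ∀ (word : String), Dom_simpleStemming word → Spec_simpleStemming word (simpleStemming word)

-- ===== LEMMAS AND PROOFS =====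

-- the prefix word[:-i] and suffix word[i:]; pvPair is what the pair (i ≥ 1) contributes after
-- first-occurrence dedup; pvRaw is the raw pair; pvTail is the pair stream for i = lo .. lo+d-1
def pvPre (word : String) (i : Int) : String := PySem.Str.slice word none (some (-i))
def pvSuf (word : String) (i : Int) : String := PySem.Str.slice word (some i) none
def pvPair (word : String) (i : Int) : List String :=
  if pvSuf word i = pvPre word i then [pvPre word i] else [pvPre word i, pvSuf word i]
def pvRaw (word : String) (j : Nat) : List String := [pvPre word (j : Int), pvSuf word (j : Int)]
def pvTail (word : String) (lo d : Nat) : List String :=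
  (List.range' lo d).flatMap (fun (j : Nat) => pvPair word (j : Int))

lemma pvSuf_toList (word : String) (j : Nat) : (pvSuf word (j : Int)).toList = word.toList.drop j := by
  simp [pvSuf, PySem.Str.slice, PySem.List.slice_from_natCast]

lemma pvPre_toList (word : String) (j : Nat) (hj : 1 ≤ j) :
    (pvPre word (j : Int)).toList = word.toList.take (word.length - j) := by
  simp [pvPre, PySem.Str.slice]
  rw [PySem.List.slice_to_neg_natCast _ j hj, String.length_toList]

lemma pvSuf_length (word : String) (j : Nat) :
    (pvSuf word (j : Int)).length = word.length - j := by
  rw [← String.length_toList, pvSuf_toList]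
  simp

lemma pvPre_length (word : String) (j : Nat) (hj : 1 ≤ j) :
    (pvPre word (j : Int)).length = word.length - j := by
  rw [← String.length_toList, pvPre_toList word j hj]
  simp [String.length_toList]

lemma pvPre_zero (word : String) : pvPre word 0 = "" := by
  apply String.toList_inj.mp
  simp [pvPre, PySem.Str.slice, PySem.List.slice]

lemma pvSuf_zero (word : String) : pvSuf word 0 = word := by
  apply String.toList_inj.mp
  have := pvSuf_toList word 0
  simpa using this

lemma pvTail_succ (word : String) (lo d : Nat) :
    pvTail word lo (d + 1) = pvPair word (lo : Int) ++ pvTail word (lo + 1) d := by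
  simp [pvTail, List.range'_succ]

lemma pvPair_mem_length (word : String) (lo : Nat) (hlo : 1 ≤ lo) (x : String)
    (hx : x ∈ pvPair word (lo : Int)) : x.length = word.length - lo := by
  unfold pvPair at hx
  split at hx
  · simp at hx; rw [hx]; exact pvPre_length word lo hlo
  · rcases List.mem_pair.mp hx with h | h
    · rw [h]; exact pvPre_length word lo hlo
    · rw [h]; exact pvSuf_length word lo

-- every element of the tail has length n - j for some admitted j
lemma pvTail_mem_len (word : String) :
    ∀ (d lo : Nat) (x : String), 1 ≤ lo →
      x ∈ pvTail word lo d →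
      ∃ j : Nat, lo ≤ j ∧ j < lo + d ∧ x.length = word.length - j := by
  intro d
  induction d with
  | zero => intro lo x _ hx; simp [pvTail] at hx
  | succ d ih =>
    intro lo x hlo hx
    rw [pvTail_succ] at hx
    rcases List.mem_append.mp hx with hx | hx
    · exact ⟨lo, le_refl _, by omega, pvPair_mem_length word lo hlo x hx⟩
    · rcases ih (lo + 1) x (by omega) hx with ⟨j, h1, h2, h3⟩
      exact ⟨j, by omega, by omega, h3⟩

lemma pvTail_pairwise (word : String) :
    ∀ (d lo : Nat), 1 ≤ lo →
      (pvTail word lo d).Pairwise (fun a b => PySem.Str.len b ≤ PySem.Str.len a) := by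
  intro d
  induction d with
  | zero => intro lo _; simp [pvTail]
  | succ d ih =>
    intro lo hlo
    rw [pvTail_succ, List.pairwise_append]
    refine ⟨?_, ih (lo + 1) (by omega), ?_⟩
    · unfold pvPair
      split
      · simp
      · simp [pvPre_length word lo hlo, pvSuf_length word lo]
    · intro a ha b hb
      have hlena := pvPair_mem_length word lo hlo a ha
      rcases pvTail_mem_len word d (lo + 1) b (by omega) hb with ⟨j, h1, h2, h3⟩
      simp [hlena, h3]
      omega

-- first-occurrence dedup of the raw pair stream is the per-pair dedup, given everything
-- already collected is either empty or strictly longer than anything still to come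
lemma pvFold_add (word : String) :
    ∀ (d lo : Nat) (s : List String), 1 ≤ lo → lo + d = word.length →
      (∀ x ∈ s, x.length = 0 ∨ word.length - lo < x.length) →
      ((List.range' lo d).flatMap (pvRaw word)).foldl PySem.Set.add s
        = s ++ pvTail word lo d := by
  intro d
  induction d with
  | zero => intro lo s _ _ _; simp [pvTail]
  | succ d ih =>
    intro lo s hlo hld hs
    have hplen : (pvPre word (lo : Int)).length = word.length - lo :=
      pvPre_length word lo hlo
    have hslen : (pvSuf word (lo : Int)).length = word.length - lo :=
      pvSuf_length word lo
    have hpos : 1 ≤ word.length - lo := by omega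
    rw [List.range'_succ, List.flatMap_cons, List.foldl_append]
    have hpre_nmem : pvPre word (lo : Int) ∉ s := by
      intro hmem
      rcases hs _ hmem with h | h <;> omega
    have hstep1 : PySem.Set.add s (pvPre word (lo : Int)) = s ++ [pvPre word (lo : Int)] := by
      simp [PySem.Set.add, hpre_nmem]
    have hstep : (pvRaw word lo).foldl PySem.Set.add s = s ++ pvPair word (lo : Int) := by
      by_cases hsp : pvSuf word (lo : Int) = pvPre word (lo : Int)
      · have h2 : PySem.Set.add (s ++ [pvPre word (lo : Int)]) (pvSuf word (lo : Int))
            = s ++ [pvPre word (lo : Int)] := by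
          simp [PySem.Set.add, hsp]
        simp [pvRaw, List.foldl_cons, hstep1, pvPair, hsp]
      · have hsuf_nmem : pvSuf word (lo : Int) ∉ s ++ [pvPre word (lo : Int)] := by
          intro hmem
          rcases List.mem_append.mp hmem with h | h
          · rcases hs _ h with h' | h' <;> omega
          · simp at h; exact hsp h
        have h2 : PySem.Set.add (s ++ [pvPre word (lo : Int)]) (pvSuf word (lo : Int))
            = s ++ [pvPre word (lo : Int), pvSuf word (lo : Int)] := by
          simp [PySem.Set.add, hsuf_nmem]
        simp [pvRaw, List.foldl_cons, hstep1, h2, pvPair, hsp]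
    rw [hstep, pvTail_succ]
    rw [ih (lo + 1) (s ++ pvPair word (lo : Int)) (by omega) (by omega) ?_]
    · simp
    · intro x hx
      rcases List.mem_append.mp hx with h | h
      · rcases hs _ h with h' | h'
        · exact Or.inl h'
        · right; omega
      · right
        rw [pvPair_mem_length word lo hlo x h]
        omega

-- unfolding equations for PySem.List.insertBy
lemma pvInsertBy_nil {α : Type} (bef : α → α → Bool) (x : α) :
    PySem.List.insertBy bef x [] = [x] := by
  simp [PySem.List.insertBy]

lemma pvInsertBy_cons_neg {α : Type} (bef : α → α → Bool) (x y : α) (ys : List α)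
    (h : bef x y = false) :
    PySem.List.insertBy bef x (y :: ys) = y :: PySem.List.insertBy bef x ys := by
  rw [PySem.List.insertBy]
  simp [h]

lemma pvInsertBy_cons_pos {α : Type} (bef : α → α → Bool) (x y : α) (ys : List α)
    (h : bef x y = true) :
    PySem.List.insertBy bef x (y :: ys) = x :: y :: ys := by
  simp [PySem.List.insertBy, h]

-- inserting a nonempty string no longer than anything in `front` lands right before the final ""
lemma pvInsert (x : String) :
    ∀ (front : List String), (∀ y ∈ front, ¬ (PySem.Str.len y < PySem.Str.len x)) →
      1 ≤ x.length →
      PySem.List.insertBy (fun a b => decide (PySem.Str.len b < PySem.Str.len a)) x (front ++ [""])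
        = front ++ [x, ""] := by
  intro front
  induction front with
  | nil =>
    intro _ hx
    have hlt : (decide (PySem.Str.len "" < PySem.Str.len x)) = true := by
      rw [decide_eq_true_iff]
      simp
      omega
    rw [List.nil_append, pvInsertBy_cons_pos _ _ _ _ hlt]
    rfl
  | cons y ys ih =>
    intro hfront hx
    have hy : (decide (PySem.Str.len y < PySem.Str.len x)) = false := by
      simpa using hfront y (by simp)
    rw [List.cons_append, pvInsertBy_cons_neg _ _ _ _ hy,
      ih (fun z hz => hfront z (List.mem_cons_of_mem _ hz)) hx]
    rfl

lemma pvSortFold :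
    ∀ (M front : List String),
      (∀ x ∈ M, 1 ≤ x.length) →
      (∀ y ∈ front, ∀ x ∈ M, PySem.Str.len x ≤ PySem.Str.len y) →
      M.Pairwise (fun a b => PySem.Str.len b ≤ PySem.Str.len a) →
      M.foldl
          (fun acc x =>
            PySem.List.insertBy (fun a b => decide (PySem.Str.len b < PySem.Str.len a)) x acc)
          (front ++ [""])
        = front ++ M ++ [""] := by
  intro M
  induction M with
  | nil => intro front _ _ _; simp
  | cons x M ih =>
    intro front h1 h2 hp
    rw [List.foldl_cons]
    rw [pvInsert x front
      (fun y hy => not_lt_of_ge (h2 y hy x (by simp))) (h1 x (by simp))]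
    rw [show front ++ [x, ""] = (front ++ [x]) ++ [""] from by simp]
    rw [ih (front ++ [x]) (fun z hz => h1 z (List.mem_cons_of_mem _ hz)) ?_
      (List.Pairwise.sublist (List.sublist_cons_self _ _) hp)]
    · simp
    · intro y hy z hz
      rcases List.mem_append.mp hy with h | h
      · exact h2 y h z (List.mem_cons_of_mem _ hz)
      · simp at h; rw [h]
        exact (List.pairwise_cons.mp hp).1 z hz

-- trimming [1:-1] off  w :: (M ++ [e])  leaves M
lemma pvTrim (w e : String) (M : List String) :
    PySem.List.slice (w :: (M ++ [e])) (some 1) (some (-1)) = M := by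
  have h1 : PySem.List.clampIdx (w :: (M ++ [e])).length 1 = 1 := by
    simp [PySem.List.clampIdx]
  have h2 : PySem.List.clampIdx (w :: (M ++ [e])).length (-1) = (w :: (M ++ [e])).length - 1 :=
    PySem.List.clampIdx_neg_one _
  simp only [PySem.List.slice]
  rw [h1, h2, List.drop_one]
  simp only [List.tail_cons, List.length_cons, List.length_append, List.length_nil]
  rw [show M.length + 1 + 1 - 1 - 1 = M.length from by omega, List.take_left]

-- a pyRange-driven flatMap is the Nat-range flatMap
lemma pvRange_flatMap (g : Int → List String) (lo d : Nat) :
    (PySem.List.pyRange (lo : Int) ((lo + d : Nat) : Int) 1).flatMap g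
      = (List.range' lo d).flatMap (fun (j : Nat) => g (j : Int)) := by
  rw [PySem.List.pyRange_one, List.flatMap_map, List.range'_eq_map_range, List.flatMap_map]
  rw [show ((lo + d : Nat) : Int) - (lo : Int) = (d : Int) from by push_cast; ring, Int.toNat_natCast]
  apply List.flatMap_congr
  intro a _
  norm_cast

-- B computes the tail directly
lemma pvB_eq (word : String) :
    simpleStemming_alt word = pvTail word 1 (word.length - 2) := by
  unfold simpleStemming_alt
  rcases Nat.lt_or_ge word.length 2 with h | h
  · have hle : PySem.Str.len word - 1 ≤ 1 := by
      rw [PySem.Str.len_eq, String.length_toList]; omega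
    rw [PySem.List.pyRange_one_eq_nil hle]
    rw [show word.length - 2 = 0 from by omega]
    simp [pvTail]
  · have hcast : PySem.Str.len word - 1 = ((1 + (word.length - 2) : Nat) : Int) := by
      rw [PySem.Str.len_eq, String.length_toList]; push_cast; omega
    rw [hcast]
    rw [PySem.List.foldl_congr_mem _ _ (fun res i => res ++ pvPair word i) _ ?_]
    · rw [PySem.List.foldl_append_eq_flatMap, List.nil_append]
      exact pvRange_flatMap (pvPair word) 1 (word.length - 2)
    · intro acc i _
      simp only [pvPair, pvPre, pvSuf]
      by_cases hsp : PySem.Str.slice word (some i) none = PySem.Str.slice word none (some (-i))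
      · simp [hsp]
      · simp [hsp]

-- A computes the same tail
lemma pvA_eq (word : String) (hn : 1 ≤ word.length) :
    simpleStemming word = pvTail word 1 (word.length - 2) := by
  have hword : word ≠ "" := by
    intro h; rw [h] at hn; simp at hn
  unfold simpleStemming
  -- step 1: the raw morph list is a flatMap of prefix/suffix pairs
  rw [PySem.List.foldl_congr_mem _ _
    (fun acc i => acc ++ [pvPre word i, pvSuf word i]) _ ?_]
  swap
  · intro acc i _
    simp only [pvPre, pvSuf]
    rw [show i * (-1) = -i from by ring, List.append_assoc]
    rfl
  rw [PySem.List.foldl_append_eq_flatMap, List.nil_append]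
  -- split off i = 0
  have hlen : PySem.Str.len word = ((word.length : Nat) : Int) := by
    rw [PySem.Str.len_eq, String.length_toList]
  rw [hlen, PySem.List.pyRange_one_cons (by exact_mod_cast hn)]
  rw [List.flatMap_cons, pvPre_zero, pvSuf_zero]
  -- the remaining range as a Nat range
  rw [show (0:Int) + 1 = ((1:Nat) : Int) from rfl,
    show ((word.length : Nat) : Int) = ((1 + (word.length - 1) : Nat) : Int) from by push_cast; omega,
    pvRange_flatMap (fun i => [pvPre word i, pvSuf word i]) 1 (word.length - 1),
    show (fun j : Nat => [pvPre word (j : Int), pvSuf word (j : Int)]) = pvRaw word from rfl]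
  -- step 2: dedup
  rw [show PySem.List.dedup = fun xs : List String => xs.foldl PySem.Set.add [] from rfl]
  simp only []
  rw [List.foldl_append]
  have hinit : ([("" : String), word]).foldl PySem.Set.add [] = [("" : String), word] := by
    have h1 : PySem.Set.add ([] : List String) "" = [""] := by simp [PySem.Set.add]
    have h2 : PySem.Set.add [""] word = ["", word] := by
      have : word ∉ [("" : String)] := by simpa using hword
      simp [PySem.Set.add, this]
    simp [List.foldl_cons, h2]
  rw [hinit]
  rw [pvFold_add word (word.length - 1) 1 [("" : String), word] (le_refl _) (by omega) ?_]
  swap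
  · intro x hx
    rcases List.mem_pair.mp hx with h | h
    · left; rw [h]; rfl
    · right; rw [h]; omega
  -- step 3: the stable reverse sort
  rw [PySem.List.sorted_rev_eq_foldl_insertBy]
  rw [show ([("" : String), word] ++ pvTail word 1 (word.length - 1))
    = ("" : String) :: (word :: pvTail word 1 (word.length - 1)) from rfl]
  rw [List.foldl_cons, List.foldl_cons, pvInsertBy_nil]
  have hins2 : PySem.List.insertBy
      (fun a b => decide (PySem.Str.len b < PySem.Str.len a)) word [""] = [word, ""] := by
    have hlt : (decide (PySem.Str.len "" < PySem.Str.len word)) = true := by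
      rw [decide_eq_true_iff]
      simp
      omega
    rw [pvInsertBy_cons_pos _ _ _ _ hlt]
  rw [hins2, show ([word, ""] : List String) = [word] ++ [""] from rfl]
  rw [pvSortFold (pvTail word 1 (word.length - 1)) [word] ?_ ?_
    (pvTail_pairwise word (word.length - 1) 1 (le_refl _))]
  · -- step 4: trim, then the length-≥-2 filter drops exactly the i = n-1 pair
    rw [show ([word] ++ pvTail word 1 (word.length - 1) ++ [""] : List String)
      = word :: (pvTail word 1 (word.length - 1) ++ [""]) from by simp]
    rw [pvTrim]
    rcases Nat.lt_or_ge word.length 2 with h2 | h2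
    · rw [show word.length - 1 = 0 from by omega, show word.length - 2 = 0 from by omega]
      simp [pvTail]
    · have hkeep : ((List.range' 1 (word.length - 2)).flatMap
          (fun (j : Nat) => pvPair word (j : Int))).filter (fun i => decide (2 ≤ PySem.Str.len i))
          = (List.range' 1 (word.length - 2)).flatMap (fun (j : Nat) => pvPair word (j : Int)) := by
        apply List.filter_eq_self.mpr
        intro x hx
        rcases pvTail_mem_len word (word.length - 2) 1 x (le_refl _) hx with ⟨j, hj1, hj2, hj3⟩
        simp [hj3]
        omega
      have hdrop : (pvPair word (((1 + 1 * (word.length - 2) : Nat)) : Int)).filter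
          (fun i => decide (2 ≤ PySem.Str.len i)) = [] := by
        apply List.filter_eq_nil_iff.mpr
        intro x hx
        have hxl : x.length = 1 := by
          rw [show ((1 + 1 * (word.length - 2) : Nat)) = word.length - 1 from by omega] at hx
          rw [pvPair_mem_length word (word.length - 1) (by omega) x hx]
          omega
        simp [hxl]
      rw [show word.length - 1 = (word.length - 2) + 1 from by omega,
        show pvTail word 1 ((word.length - 2) + 1)
          = (List.range' 1 ((word.length - 2) + 1)).flatMap (fun (j : Nat) => pvPair word (j : Int)) from rfl,
        List.range'_concat, List.flatMap_append, List.filter_append, hkeep,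
        List.flatMap_singleton, hdrop, List.append_nil]
      rfl
  · intro x hx
    rcases pvTail_mem_len word (word.length - 1) 1 x (le_refl _) hx with ⟨j, hj1, hj2, hj3⟩
    omega
  · intro y hy x hx
    rcases pvTail_mem_len word (word.length - 1) 1 x (le_refl _) hx with ⟨j, hj1, hj2, hj3⟩
    simp at hy
    rw [hy]
    simp [hj3]

-- ===== VERDICT (by name: the statement is the Claim_ definition above) =====
theorem simpleStemming_spec : Claim_equal_simpleStemming := by
  intro word _
  unfold Spec_simpleStemming
  rcases Nat.eq_zero_or_pos word.length with h | h
  · have : word = "" := String.toList_inj.mp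
      (List.length_eq_zero_iff.mp (by rw [String.length_toList]; exact h))
    subst this
    decide
  · rw [pvA_eq word h, pvB_eq word]
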